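-- pv_equiv track=rewrite | github.com/Tofunmi2707/line_based_rgbd_slam_final_project | scripts/analysis/summarise_odometry_debug.py | choose_initial_run_for_rejection_chart
-- ===== SOURCE A (Python) =====
-- def choose_initial_run_for_rejection_chart(runs: list[dict]) -> dict | None:
--     """
--     Choose the most informative run for the baseline rejection-reason chart.
--
--     The preferred order reflects the project reporting priority, with
--     fr1_room / v1_centroid used first when available.
--
--     Args:
--         runs: List of run-summary dictionaries.
--
--     Returns:
--         Selected run-summary dictionary, or None if no runs exist.
--     """
--     preferred = [
--         ("fr1_room", "v1_centroid"),
--         ("fr1_desk", "v1_centroid"),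
--         ("fr1_xyz", "v1_centroid"),
--     ]
--     for dataset, method in preferred:
--         for r in runs:
--             if r["dataset"] == dataset and r["method"] == method:
--                 return r
--     return runs[0] if runs else None
-- ===== SOURCE B (Python) =====
-- def _rank(r: dict) -> int:
--     """Priority rank of a run: 0..2 for the preferred (dataset, method) pairs, 3 otherwise."""
--     if r["dataset"] == "fr1_room" and r["method"] == "v1_centroid":
--         return 0
--     if r["dataset"] == "fr1_desk" and r["method"] == "v1_centroid":
--         return 1
--     if r["dataset"] == "fr1_xyz" and r["method"] == "v1_centroid":
--         return 2
--     return 3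
--
--
-- def choose_initial_run_for_rejection_chart(runs: list[dict]) -> dict | None:
--     # One pass: the run with the smallest priority rank; Python's min keeps
--     # the first minimum, which matches list-order tie-breaking, and a rank-3
--     # minimum means no preferred pair occurs, so the first run is returned.
--     return min(runs, key=_rank) if runs else None
-- ===== Notes on version B (the rewrite author's own statement) =====
-- stated objective: idiomatic
-- what changed: Instead of scanning the whole run list once per preferred (dataset, method) pair, B assigns every run a priority rank (0-2 for the preferred pairs, 3 otherwise) and returns the first rank-minimal run in a single min(runs, key=_rank) pass; a rank-3 minimum is exactly A's runs[0] fallback.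
import Mathlib
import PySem

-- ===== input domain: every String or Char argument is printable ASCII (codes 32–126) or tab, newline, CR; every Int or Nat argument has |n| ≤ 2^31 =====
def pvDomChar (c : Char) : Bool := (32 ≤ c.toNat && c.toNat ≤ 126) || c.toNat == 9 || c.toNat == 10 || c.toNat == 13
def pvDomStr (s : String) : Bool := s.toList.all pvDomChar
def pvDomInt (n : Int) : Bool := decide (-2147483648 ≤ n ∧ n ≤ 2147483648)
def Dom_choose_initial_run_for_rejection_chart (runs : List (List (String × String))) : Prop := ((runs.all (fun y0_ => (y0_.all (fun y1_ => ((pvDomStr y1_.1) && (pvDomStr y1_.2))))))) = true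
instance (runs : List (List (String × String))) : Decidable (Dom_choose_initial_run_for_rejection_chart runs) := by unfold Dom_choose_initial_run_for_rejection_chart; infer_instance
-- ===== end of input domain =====

-- B replaces A's staged scans (one full pass per preferred pair, then a runs[0] fallback) by a
-- single min-by-priority-rank pass over the runs; return value only.

-- dict lookup on an association list: FIRST match; none = KeyError / dict.get miss
def pvLookup (r : List (String × String)) (k : String) : Option String :=
  (r.find? (fun p => p.1 == k)).map (·.2)

-- ===== PORT A =====
-- inner 'for r in runs: if r["dataset"] == dataset and r["method"] == method: return r'
def pvScanA (runs : List (List (String × String))) (dataset method : String) :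
    Option (List (String × String)) :=
  match runs with
  | [] => none
  | r :: rest =>
    if pvLookup r "dataset" == some dataset && pvLookup r "method" == some method then some r
    else pvScanA rest dataset method

-- outer 'for dataset, method in preferred'
def pvOuterA (preferred : List (String × String)) (runs : List (List (String × String))) :
    Option (List (String × String)) :=
  match preferred with
  | [] => none
  | (dataset, method) :: rest =>
    match pvScanA runs dataset method with
    | some r => some r
    | none => pvOuterA rest runs

def choose_initial_run_for_rejection_chart (runs : List (List (String × String))) :
    Option (List (String × String)) :=
  let preferred := [("fr1_room", "v1_centroid"), ("fr1_desk", "v1_centroid"), ("fr1_xyz", "v1_centroid")]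
  match pvOuterA preferred runs with
  | some r => some r
  | none => match runs with
    | [] => none
    | r :: _ => some r

-- ===== PORT B =====
-- '_rank(r)': 0..2 for the preferred (dataset, method) pairs, 3 otherwise
-- (exact on Pre_ inputs, where every lookup _rank performs succeeds)
def pvRank (r : List (String × String)) : Int :=
  if pvLookup r "dataset" == some "fr1_room" && pvLookup r "method" == some "v1_centroid" then 0
  else if pvLookup r "dataset" == some "fr1_desk" && pvLookup r "method" == some "v1_centroid" then 1
  else if pvLookup r "dataset" == some "fr1_xyz" && pvLookup r "method" == some "v1_centroid" then 2
  else 3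

-- 'return min(runs, key=_rank) if runs else None'
def choose_initial_run_for_rejection_chart_alt (runs : List (List (String × String))) :
    Option (List (String × String)) :=
  match runs with
  | [] => none
  | _ :: _ => PySem.List.min? runs pvRank

-- ===== PRECONDITION & SPEC =====
-- Pre_ excludes lists where some run lacks the "dataset" key, or lacks "method" while its
-- dataset is one of the three preferred ones: on such runs the key lookups raise KeyError
-- (B's _rank always, A whenever a scan reaches the defective run before a match).
def Pre_choose_initial_run_for_rejection_chart (runs : List (List (String × String))) : Prop :=
  (runs.all (fun r =>
    match pvLookup r "dataset" with
    | none => false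
    | some d =>
      if d = "fr1_room" ∨ d = "fr1_desk" ∨ d = "fr1_xyz" then (pvLookup r "method").isSome
      else true)) = true
instance (runs : List (List (String × String))) : Decidable (Pre_choose_initial_run_for_rejection_chart runs) := by unfold Pre_choose_initial_run_for_rejection_chart; infer_instance

def pvWitness_choose_initial_run_for_rejection_chart : (List (List (String × String))) :=
  [[("dataset", "other_ds")], [("dataset", "fr1_room"), ("method", "v1_centroid")]]

def Spec_choose_initial_run_for_rejection_chart (runs : List (List (String × String))) (out : Option (List (String × String))) : Prop := out = choose_initial_run_for_rejection_chart_alt runs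
instance (runs : List (List (String × String))) (out : Option (List (String × String))) : Decidable (Spec_choose_initial_run_for_rejection_chart runs out) := by unfold Spec_choose_initial_run_for_rejection_chart; infer_instance

-- ===== CLAIM =====
def Claim_equal_choose_initial_run_for_rejection_chart : Prop := ∀ (runs : List (List (String × String))), Dom_choose_initial_run_for_rejection_chart runs → Pre_choose_initial_run_for_rejection_chart runs → Spec_choose_initial_run_for_rejection_chart runs (choose_initial_run_for_rejection_chart runs)

-- ===== LEMMAS AND PROOFS =====

-- priority chain: first element of rank 0, else of rank 1, …, else of rank k-1
def pvChain (k : Nat) (runs : List (List (String × String))) :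
    Option (List (String × String)) :=
  match k with
  | 0 => none
  | n + 1 =>
    match pvChain n runs with
    | some r => some r
    | none => runs.find? (fun r => pvRank r == (n : Int))

theorem pvRank_bounds (r : List (String × String)) : 0 ≤ pvRank r ∧ pvRank r < 4 := by
  unfold pvRank; split_ifs <;> norm_num

theorem pvChain_nil (k : Nat) : pvChain k [] = none := by
  induction k with
  | zero => rfl
  | succ n ih => simp [pvChain, ih]

theorem pvChain_cons_ge (k : Nat) (r : List (String × String)) (rest : List (List (String × String)))
    (h : k ≤ (pvRank r).toNat) : pvChain k (r :: rest) = pvChain k rest := by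
  induction k with
  | zero => rfl
  | succ n ih =>
    have hne : (pvRank r == (n : Int)) = false := by
      have hb := pvRank_bounds r
      simp only [beq_eq_false_iff_ne, ne_eq]
      omega
    simp only [pvChain, ih (by omega), List.find?_cons, hne]

theorem pvChain_cons_lt (k : Nat) (r : List (String × String)) (rest : List (List (String × String)))
    (h : (pvRank r).toNat < k) :
    pvChain k (r :: rest) =
      (match pvChain (pvRank r).toNat rest with
       | some x => some x
       | none => some r) := by
  induction k with
  | zero => omega
  | succ n ih =>
    by_cases hn : (pvRank r).toNat = n
    · subst hn
      have heq : (pvRank r == ((pvRank r).toNat : Int)) = true := by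
        have hb := pvRank_bounds r
        simp only [beq_iff_eq]; omega
      rw [pvChain, pvChain_cons_ge (pvRank r).toNat r rest (le_refl _)]
      simp only [List.find?_cons, heq]
    · have h' : (pvRank r).toNat < n := by omega
      rw [pvChain, ih h']
      cases pvChain (pvRank r).toNat rest <;> rfl

-- the fold step of PySem.List.min? with key pvRank (definitionally equal to it)
def pvStep (acc : Option (List (String × String))) (x : List (String × String)) :
    Option (List (String × String)) :=
  match acc with
  | none => some x
  | some m => if pvRank x < pvRank m then some x else some m

-- the min-fold with a seed picks the first rank-minimal element of seed :: rest
theorem pvFold_min (f : Option (List (String × String)) → List (String × String) → Option (List (String × String)))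
    (hf : ∀ acc x, f acc x = pvStep acc x)
    (rest : List (List (String × String))) (m : List (String × String)) :
    rest.foldl f (some m)
    = some (match pvChain (pvRank m).toNat rest with
            | some x => x
            | none => m) := by
  induction rest generalizing m with
  | nil => simp [pvChain_nil]
  | cons x rest ih =>
    simp only [List.foldl_cons, hf, pvStep]
    by_cases hlt : pvRank x < pvRank m
    · have hlt' : (pvRank x).toNat < (pvRank m).toNat := by
        have := pvRank_bounds x; have := pvRank_bounds m; omega
      rw [if_pos hlt, ih x, pvChain_cons_lt _ x rest hlt']
      cases pvChain (pvRank x).toNat rest <;> rfl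
    · have hge : (pvRank m).toNat ≤ (pvRank x).toNat := by
        have := pvRank_bounds x; have := pvRank_bounds m; omega
      rw [if_neg hlt, ih m, pvChain_cons_ge _ x rest hge]


theorem pvAlt_eq_chain (runs : List (List (String × String))) :
    choose_initial_run_for_rejection_chart_alt runs = pvChain 4 runs := by
  cases runs with
  | nil => simp [choose_initial_run_for_rejection_chart_alt, pvChain_nil]
  | cons r rest =>
    have h4 : (pvRank r).toNat < 4 := by have := pvRank_bounds r; omega
    show List.foldl _ (some r) rest = pvChain 4 (r :: rest)
    refine (pvFold_min _ (fun acc x => by cases acc <;> rfl) rest r).trans ?_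
    rw [pvChain_cons_lt 4 r rest h4]
    cases pvChain (pvRank r).toNat rest <;> rfl

-- A's inner scan for a preferred pair is the first element of the pair's rank
theorem pvScanA_eq_find (ds mth : String) (k : Int)
    (hcond : ∀ r, (pvLookup r "dataset" == some ds && pvLookup r "method" == some mth)
                  = (pvRank r == k))
    (runs : List (List (String × String))) :
    pvScanA runs ds mth = runs.find? (fun r => pvRank r == k) := by
  induction runs with
  | nil => rfl
  | cons r rest ih =>
    rw [pvScanA, hcond r, List.find?_cons, ih]
    cases hpk : (pvRank r == k) <;> simp

theorem pvCond0 (r : List (String × String)) :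
    (pvLookup r "dataset" == some "fr1_room" && pvLookup r "method" == some "v1_centroid")
    = (pvRank r == (0 : Int)) := by
  unfold pvRank
  split_ifs <;> simp_all

theorem pvCond1 (r : List (String × String)) :
    (pvLookup r "dataset" == some "fr1_desk" && pvLookup r "method" == some "v1_centroid")
    = (pvRank r == (1 : Int)) := by
  unfold pvRank
  split_ifs <;> simp_all

theorem pvCond2 (r : List (String × String)) :
    (pvLookup r "dataset" == some "fr1_xyz" && pvLookup r "method" == some "v1_centroid")
    = (pvRank r == (2 : Int)) := by
  unfold pvRank
  split_ifs <;> simp_all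

-- if no run has rank 0, 1 or 2, the rank-3 search returns the head
theorem pvFind3_of_chain3_none (runs : List (List (String × String)))
    (h : pvChain 3 runs = none) :
    runs.find? (fun r => pvRank r == (3 : Int)) = runs.head? := by
  have hsplit : runs.find? (fun r => pvRank r == ((0 : Nat) : Int)) = none ∧
      runs.find? (fun r => pvRank r == ((1 : Nat) : Int)) = none ∧
      runs.find? (fun r => pvRank r == ((2 : Nat) : Int)) = none := by
    simp only [pvChain] at h
    rcases hc0 : runs.find? (fun x => pvRank x == ((0 : Nat) : Int)) with _ | v0 <;>
      rw [hc0] at h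
    · rcases hc1 : runs.find? (fun x => pvRank x == ((1 : Nat) : Int)) with _ | v1 <;>
        rw [hc1] at h
      · rcases hc2 : runs.find? (fun x => pvRank x == ((2 : Nat) : Int)) with _ | v2 <;>
          rw [hc2] at h
        · exact ⟨rfl, rfl, rfl⟩
        · exact absurd h (by simp)
      · exact absurd h (by simp)
    · exact absurd h (by simp)
  cases runs with
  | nil => rfl
  | cons r rest =>
    have hb := pvRank_bounds r
    have hm : r ∈ r :: rest := List.mem_cons_self
    have h0 := List.find?_eq_none.mp hsplit.1 r hm
    have h1 := List.find?_eq_none.mp hsplit.2.1 r hm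
    have h2 := List.find?_eq_none.mp hsplit.2.2 r hm
    simp only [beq_iff_eq, Nat.cast_ofNat, Nat.cast_zero, Nat.cast_one] at h0 h1 h2
    have h3 : (pvRank r == (3 : Int)) = true := by
      simp only [beq_iff_eq]; omega
    simp [h3]

-- ===== VERDICT =====
theorem choose_initial_run_for_rejection_chart_spec : Claim_equal_choose_initial_run_for_rejection_chart := by
  intro runs _ _
  unfold Spec_choose_initial_run_for_rejection_chart
  rw [pvAlt_eq_chain]
  unfold choose_initial_run_for_rejection_chart
  simp only [pvOuterA,
    pvScanA_eq_find _ _ 0 pvCond0 runs,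
    pvScanA_eq_find _ _ 1 pvCond1 runs,
    pvScanA_eq_find _ _ 2 pvCond2 runs]
  have hchain3 : pvChain 3 runs =
      (match runs.find? (fun r => pvRank r == (0 : Int)) with
       | some r => some r
       | none =>
         match runs.find? (fun r => pvRank r == (1 : Int)) with
         | some r => some r
         | none => runs.find? (fun r => pvRank r == (2 : Int))) := by
    simp only [pvChain]
    cases runs.find? (fun r => pvRank r == ((0:Nat) : Int)) <;>
      cases runs.find? (fun r => pvRank r == ((1:Nat) : Int)) <;> simp
  rcases hc : pvChain 3 runs with _ | v
  · rw [hchain3] at hc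
    rcases h0 : runs.find? (fun r => pvRank r == (0 : Int)) with _ | v0 <;> rw [h0] at hc
    · rcases h1 : runs.find? (fun r => pvRank r == (1 : Int)) with _ | v1 <;> rw [h1] at hc
      · simp only at hc
        rw [hc]
        have hfind3 := pvFind3_of_chain3_none runs (by rw [hchain3, h0, h1, hc])
        have : pvChain 4 runs = runs.head? := by
          rw [pvChain, hchain3, h0, h1, hc]; exact hfind3
        rw [this]
        cases runs <;> rfl
      · simp at hc
    · simp at hc
  · rw [hchain3] at hc
    have h4 : pvChain 4 runs = some v := by
      rw [pvChain, hchain3, hc]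
    rw [h4]
    rcases h0 : runs.find? (fun r => pvRank r == (0 : Int)) with _ | v0 <;> rw [h0] at hc
    · rcases h1 : runs.find? (fun r => pvRank r == (1 : Int)) with _ | v1 <;> rw [h1] at hc
      · simp only at hc; rw [hc]
      · simp only [Option.some.injEq] at hc; rw [hc]
    · simp only [Option.some.injEq] at hc; rw [hc]
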